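-- pv_equiv track=rewrite | github.com/GalactusCZ/advent-of-code | 2024/day_5/day_5_2.py | order_updates
-- ===== SOURCE A (Python) =====
-- def order_updates(nums: list[int], rules: dict[int, list[int]]) -> int:
--     new_odering: dict[int, list[int]] = {}
--     present_nums = set(nums)
--
--     for num in nums:
--         if num in rules.keys():
--             new_odering[num] = set()
--
--             for x in rules[num]:
--                 if x in present_nums:
--                     new_odering[num].add(x)
--
--     predecessor_order: list[tuple[int, int]] = []
--
--     for num in nums:
--         amount = 0
--         for pred in new_odering.values():
--             if num in pred:
--                 amount += 1
--
--         predecessor_order.append((amount, num))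
--
--     predecessor_order.sort()
--     predecessor_order.reverse()
--
--     for i, (_, num) in enumerate(predecessor_order):
--         if i == len(predecessor_order) // 2:
--             return num
--
--     return 0
-- ===== SOURCE B (Python) =====
-- def order_updates(nums: list[int], rules: dict[int, list[int]]) -> int:
--     if not nums:
--         return 0
--     counts = {n: 0 for n in nums}
--     done = set()
--     for k in nums:
--         if k in done or k not in rules:
--             continue
--         done.add(k)
--         for x in set(rules[k]):
--             if x in counts:
--                 counts[x] += 1
--     pairs = sorted((counts[n], n) for n in nums)
--     return pairs[(len(pairs) - 1) // 2][1]
-- ===== Notes on version B (the rewrite author's own statement) =====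
-- stated objective: faster
-- what changed: A recomputes each number's predecessor count by scanning every rule set per number (nested loops) and then sorts ascending, reverses, and scans with enumerate for the middle index; B builds the counts in one pass over the deduplicated rule sets into a dict, sorts ascending once, and directly indexes the (n-1)//2-th element.
import Mathlib
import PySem

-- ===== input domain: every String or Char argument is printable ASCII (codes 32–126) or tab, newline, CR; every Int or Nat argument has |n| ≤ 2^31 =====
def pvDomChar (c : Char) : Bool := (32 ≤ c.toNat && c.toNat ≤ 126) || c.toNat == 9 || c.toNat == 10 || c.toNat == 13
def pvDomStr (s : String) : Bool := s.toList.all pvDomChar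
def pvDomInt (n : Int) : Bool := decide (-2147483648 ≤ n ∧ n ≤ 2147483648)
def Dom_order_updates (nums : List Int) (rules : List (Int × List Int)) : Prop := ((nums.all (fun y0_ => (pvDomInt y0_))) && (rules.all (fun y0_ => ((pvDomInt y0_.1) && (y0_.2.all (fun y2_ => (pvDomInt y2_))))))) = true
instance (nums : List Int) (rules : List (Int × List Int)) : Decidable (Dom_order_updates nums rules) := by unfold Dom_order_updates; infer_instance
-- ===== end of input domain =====

-- B replaces A's per-number scan over all of new_odering's sets by one counting pass
-- over the deduplicated rule sets into a dict, and replaces sort+reverse+enumerate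
-- by a single ascending sort indexed at (n-1)//2.

-- ===== PORT A =====
-- the final 'for i, (_, num) in enumerate(...): if i == len(...) // 2: return num' loop of A
def pvMidLoop (i m : Nat) : List (Int × Int) → Int
  | [] => 0
  | p :: rest => if i = m then p.2 else pvMidLoop (i + 1) m rest

def order_updates (nums : List Int) (rules : List (Int × List Int)) : Int :=
  let rd := PySem.Dict.ofList rules
  let presentNums : PySem.Set Int := PySem.Set.ofList nums
  let newOdering : PySem.Dict Int (PySem.Set Int) :=
    nums.foldl (fun d num =>
      if rd.contains num then
        (rd.getD num []).foldl
          (fun d x => if PySem.Set.contains presentNums x then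
              d.modify num [] (fun s => PySem.Set.add s x)
            else d)
          (d.insert num PySem.Set.empty)
      else d) PySem.Dict.empty
  let predecessorOrder : List (Int × Int) :=
    nums.foldl (fun acc num =>
      acc ++ [((newOdering.values.foldl
                  (fun amount pred => if PySem.Set.contains pred num then amount + 1 else amount)
                  (0 : Int)), num)]) []
  let revOrder := (PySem.List.sorted2 predecessorOrder (fun p => p.1) (fun p => p.2) false).reverse
  pvMidLoop 0 (revOrder.length / 2) revOrder

-- ===== PORT B =====
def order_updates_alt (nums : List Int) (rules : List (Int × List Int)) : Int :=
  if nums = [] then 0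
  else
    let rd := PySem.Dict.ofList rules
    let counts0 : PySem.Dict Int Int := nums.foldl (fun d n => d.insert n 0) PySem.Dict.empty
    let st :=
      nums.foldl (fun (st : PySem.Dict Int Int × PySem.Set Int) k =>
        if PySem.Set.contains st.2 k || !rd.contains k then st
        else ((PySem.Set.ofList (rd.getD k [])).foldl
                (fun c x => if c.contains x then c.modify x 0 (· + 1) else c) st.1,
              PySem.Set.add st.2 k))
        (counts0, PySem.Set.empty)
    let pairs := PySem.List.sorted2 (nums.map (fun n => (st.1.getD n 0, n)))
                   (fun p => p.1) (fun p => p.2) false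
    match PySem.List.pyGet? pairs (PySem.Int.floordiv ((pairs.length : Int) - 1) 2) with
    | some p => p.2
    | none => 0


-- ===== PRECONDITION & SPEC =====
def Spec_order_updates (nums : List Int) (rules : List (Int × List Int)) (out : Int) : Prop := out = order_updates_alt nums rules
instance (nums : List Int) (rules : List (Int × List Int)) (out : Int) : Decidable (Spec_order_updates nums rules out) := by unfold Spec_order_updates; infer_instance

-- ===== CLAIM (what is proved, stated in full; the proofs are below) =====
def Claim_equal_order_updates : Prop := ∀ (nums : List Int) (rules : List (Int × List Int)), Dom_order_updates nums rules → Spec_order_updates nums rules (order_updates nums rules)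

-- ===== LEMMAS AND PROOFS =====

-- the keys B's loop actually processes, in order (proof-only helper)
def pvNewKeys (rd : PySem.Dict Int (List Int)) : PySem.Set Int → List Int → List Int
  | _, [] => []
  | done, k :: ms =>
    if PySem.Set.contains done k || !rd.contains k then pvNewKeys rd done ms
    else k :: pvNewKeys rd (PySem.Set.add done k) ms

theorem pv_innerA (num : Int) (ys : List Int) :
    ∀ (d : PySem.Dict Int (PySem.Set Int)), d.contains num = true →
      (ys.foldl (fun d x => d.modify num [] (fun s => PySem.Set.add s x)) d).keys = d.keys ∧
      ∀ j, (ys.foldl (fun d x => d.modify num [] (fun s => PySem.Set.add s x)) d).getD j [] =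
        if j = num then ys.foldl PySem.Set.add (d.getD num []) else d.getD j [] := by
  induction ys with
  | nil => intro d _; constructor <;> simp
  | cons y ys ih =>
    intro d hd
    simp only [List.foldl_cons]
    have hd' : (d.modify num [] (fun s => PySem.Set.add s y)).contains num = true := by
      rw [PySem.Dict.contains_modify]; simp
    obtain ⟨ihk, ihg⟩ := ih _ hd'
    constructor
    · rw [ihk, PySem.Dict.keys_modify, PySem.Dict.keys_insert_of_contains _ _ hd]
    · intro j
      rw [ihg j]
      by_cases hj : j = num
      · subst hj; rw [if_pos rfl, if_pos rfl, PySem.Dict.getD_modify]; simp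
      · rw [if_neg hj, if_neg hj, PySem.Dict.getD_modify, if_neg hj]
theorem pv_outerA (rd : PySem.Dict Int (List Int)) (present : PySem.Set Int) :
    ∀ (ms : List Int) (d : PySem.Dict Int (PySem.Set Int)),
      (ms.foldl (fun d num =>
        if rd.contains num then
          (rd.getD num []).foldl
            (fun d x => if PySem.Set.contains present x then
                d.modify num [] (fun s => PySem.Set.add s x)
              else d)
            (d.insert num PySem.Set.empty)
        else d) d).keys = PySem.Set.update d.keys (ms.filter (fun k => rd.contains k)) ∧
      ∀ j, (ms.foldl (fun d num =>
        if rd.contains num then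
          (rd.getD num []).foldl
            (fun d x => if PySem.Set.contains present x then
                d.modify num [] (fun s => PySem.Set.add s x)
              else d)
            (d.insert num PySem.Set.empty)
        else d) d).getD j [] =
        if j ∈ ms.filter (fun k => rd.contains k) then
          PySem.Set.ofList ((rd.getD j []).filter (fun x => PySem.Set.contains present x))
        else d.getD j [] := by
  intro ms
  induction ms with
  | nil => intro d; constructor <;> simp [PySem.Set.update]
  | cons num ms ih =>
    intro d
    simp only [List.foldl_cons, List.filter_cons]
    by_cases hc : rd.contains num = true
    · rw [if_pos hc]
      simp only [hc, if_pos]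
      -- the inner loop
      rw [PySem.List.foldl_if_eq_foldl_filter
            (p := fun x => PySem.Set.contains present x)
            (f := fun (d : PySem.Dict Int (PySem.Set Int)) (x : Int) => d.modify num [] (fun s => PySem.Set.add s x))
            (l := rd.getD num []) (init := d.insert num PySem.Set.empty)]
      have hcontains : (d.insert num PySem.Set.empty).contains num = true :=
        PySem.Dict.contains_insert_self d num PySem.Set.empty
      obtain ⟨hk, hg⟩ := pv_innerA num ((rd.getD num []).filter (fun x => PySem.Set.contains present x)) _ hcontains
      set d' := (((rd.getD num []).filter (fun x => PySem.Set.contains present x)).foldl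
          (fun d x => d.modify num [] (fun s => PySem.Set.add s x)) (d.insert num PySem.Set.empty)) with hd'
      obtain ⟨ihk, ihg⟩ := ih d'
      constructor
      · rw [ihk, hk, PySem.Set.update_cons]
        congr 1
        by_cases hmem : d.contains num = true
        · rw [PySem.Dict.keys_insert_of_contains _ _ hmem,
              PySem.Set.add_of_mem ((PySem.Dict.contains_iff_mem_keys d num).mp hmem)]
        · rw [PySem.Dict.keys_insert_of_not_contains _ _ (by simpa using hmem),
              PySem.Set.add_of_not_mem (by
                intro h; exact hmem ((PySem.Dict.contains_iff_mem_keys d num).mpr h))]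
      · intro j
        rw [ihg j]
        by_cases hjm : j ∈ ms.filter (fun k => rd.contains k)
        · rw [if_pos hjm, if_pos (by simp [List.mem_cons, hjm])]
        · rw [if_neg hjm, hg j]
          by_cases hj : j = num
          · subst hj
            rw [if_pos rfl, if_pos (by simp)]
            rw [PySem.Dict.getD_insert]
            simp [PySem.Set.ofList_eq_foldl, PySem.Set.empty]
          · rw [if_neg hj, if_neg (by simp [List.mem_cons, hj, hjm]),
                PySem.Dict.getD_insert]
            simp [hj]
    · rw [if_neg hc]
      simp only [hc]
      obtain ⟨ihk, ihg⟩ := ih d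
      exact ⟨by simpa using ihk, by simpa using ihg⟩
theorem pv_innerB (S : List Int) :
    ∀ (c : PySem.Dict Int Int),
      (∀ j, (S.foldl (fun c x => if c.contains x then c.modify x 0 (· + 1) else c) c).contains j = c.contains j) ∧
      ∀ j, (S.foldl (fun c x => if c.contains x then c.modify x 0 (· + 1) else c) c).getD j 0 =
        c.getD j 0 + (if c.contains j then (S.count j : Int) else 0) := by
  induction S with
  | nil => intro c; simp
  | cons x S ih =>
    intro c
    simp only [List.foldl_cons]
    by_cases hx : c.contains x = true
    · rw [if_pos hx]
      obtain ⟨ihc, ihg⟩ := ih (c.modify x 0 (· + 1))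
      constructor
      · intro j
        rw [ihc j, PySem.Dict.contains_modify]
        by_cases hj : j = x
        · subst hj; simp [hx]
        · simp [hj]
      · intro j
        rw [ihg j, PySem.Dict.getD_modify, PySem.Dict.contains_modify]
        by_cases hj : j = x
        · subst hj
          simp [hx, List.count_cons_self]
          ring
        · have : (j == x) = false := by simp [hj]
          simp [this, Ne.symm hj, hj]
    · rw [if_neg hx]
      obtain ⟨ihc, ihg⟩ := ih c
      refine ⟨ihc, fun j => ?_⟩
      rw [ihg j]
      by_cases hj : j = x
      · subst hj; simp [hx]
      · by_cases hcj : c.contains j = true <;> simp [hcj, Ne.symm hj]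

theorem pv_outerB (rd : PySem.Dict Int (List Int)) :
    ∀ (ms : List Int) (c : PySem.Dict Int Int) (done : PySem.Set Int),
      (∀ j, (ms.foldl (fun (st : PySem.Dict Int Int × PySem.Set Int) k =>
        if PySem.Set.contains st.2 k || !rd.contains k then st
        else ((PySem.Set.ofList (rd.getD k [])).foldl
                (fun c x => if c.contains x then c.modify x 0 (· + 1) else c) st.1,
              PySem.Set.add st.2 k)) (c, done)).1.contains j = c.contains j) ∧
      ∀ j, (ms.foldl (fun (st : PySem.Dict Int Int × PySem.Set Int) k =>
        if PySem.Set.contains st.2 k || !rd.contains k then st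
        else ((PySem.Set.ofList (rd.getD k [])).foldl
                (fun c x => if c.contains x then c.modify x 0 (· + 1) else c) st.1,
              PySem.Set.add st.2 k)) (c, done)).1.getD j 0 =
        c.getD j 0 + (if c.contains j then
          ((pvNewKeys rd done ms).map (fun k => ((PySem.Set.ofList (rd.getD k [])).count j : Int))).sum
        else 0) := by
  intro ms
  induction ms with
  | nil => intro c done; simp [pvNewKeys]
  | cons k ms ih =>
    intro c done
    simp only [List.foldl_cons]
    by_cases hskip : (PySem.Set.contains done k || !rd.contains k) = true
    · rw [if_pos hskip]
      obtain ⟨ihc, ihg⟩ := ih c done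
      refine ⟨ihc, fun j => ?_⟩
      rw [ihg j]
      rw [pvNewKeys, if_pos hskip]
    · rw [if_neg hskip]
      obtain ⟨hic, hig⟩ := pv_innerB (PySem.Set.ofList (rd.getD k [])) c
      set c' := ((PySem.Set.ofList (rd.getD k [])).foldl
                (fun c x => if c.contains x then c.modify x 0 (· + 1) else c) c) with hc'
      obtain ⟨ihc, ihg⟩ := ih c' (PySem.Set.add done k)
      constructor
      · intro j; rw [ihc j, hic j]
      · intro j
        rw [ihg j, hig j, pvNewKeys, if_neg hskip]
        simp only [List.map_cons, List.sum_cons]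
        by_cases hcj : c.contains j = true
        · rw [if_pos hcj, if_pos (by rw [hic j]; exact hcj), if_pos hcj]
          ring
        · rw [if_neg hcj, if_neg (by rw [hic j]; exact hcj), if_neg hcj]
          simp
theorem pv_newKeys_update (rd : PySem.Dict Int (List Int)) :
    ∀ (ms : List Int) (done : PySem.Set Int),
      PySem.Set.update done (ms.filter (fun k => rd.contains k)) = done ++ pvNewKeys rd done ms := by
  intro ms
  induction ms with
  | nil => intro done; simp [pvNewKeys, PySem.Set.update]
  | cons k ms ih =>
    intro done
    rw [pvNewKeys, List.filter_cons]
    by_cases hr : rd.contains k = true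
    · simp only [hr, if_pos]
      rw [PySem.Set.update_cons]
      by_cases hd : PySem.Set.contains done k = true
      · have hmem : k ∈ done := by
          simp only [PySem.Set.contains, List.contains_eq_mem, decide_eq_true_eq] at hd
          exact hd
        rw [if_pos (by rw [hd]; rfl), PySem.Set.add_of_mem hmem, ih]
      · have hd' : PySem.Set.contains done k = false := by rwa [Bool.not_eq_true] at hd
        have hmem : k ∉ done := by
          intro h
          simp only [PySem.Set.contains, List.contains_eq_mem, decide_eq_false_iff_not] at hd'
          exact hd' h
        rw [if_neg (by rw [hd']; decide), PySem.Set.add_of_not_mem hmem, ih,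
            List.append_assoc, List.singleton_append]
    · have hr' : rd.contains k = false := by simpa using hr
      rw [hr']
      simp only [Bool.false_eq_true, if_false, Bool.not_false, Bool.or_true, if_true]
      exact ih done

theorem pv_counts0_getD (nums : List Int) (j : Int) :
    (nums.foldl (fun d n => d.insert n 0) (PySem.Dict.empty : PySem.Dict Int Int)).getD j 0 = 0 := by
  suffices h : ∀ (d : PySem.Dict Int Int), d.getD j 0 = 0 →
      (nums.foldl (fun d n => d.insert n 0) d).getD j 0 = 0 by
    exact h _ (by simp [pysem])
  induction nums with
  | nil => intro d hd; simpa using hd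
  | cons n ns ih =>
    intro d hd
    exact ih _ (by rw [PySem.Dict.getD_insert]; split <;> simp [hd])

theorem pv_counts0_contains (nums : List Int) (j : Int) :
    (nums.foldl (fun d n => d.insert n 0) (PySem.Dict.empty : PySem.Dict Int Int)).contains j = decide (j ∈ nums) := by
  rw [PySem.Dict.contains_eq_decide_mem_keys]
  rw [PySem.Dict.keys_foldl_insert (f := fun _ _ => (0:Int))]
  simp [PySem.Set.mem_update, PySem.Dict.keys_empty]

theorem pv_midLoop_get : ∀ (xs : List (Int × Int)) (i m : Nat), i ≤ m → (hm : m - i < xs.length) →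
    pvMidLoop i m xs = (xs[m - i]).2 := by
  intro xs
  induction xs with
  | nil => intro i m _ hm; simp at hm
  | cons p rest ih =>
    intro i m hi hm
    by_cases h : i = m
    · simp [pvMidLoop, h]
    · have h1 : i + 1 ≤ m := by omega
      have h2 : m - (i+1) < rest.length := by simp at hm ⊢; omega
      rw [pvMidLoop, if_neg h, ih _ _ h1 h2]
      have : m - i = (m - (i+1)) + 1 := by omega
      simp [this]

theorem pv_count_nodup (l : List Int) (a : Int) (h : l.Nodup) :
    (l.count a : Int) = if a ∈ l then 1 else 0 := by
  by_cases hm : a ∈ l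
  · rw [if_pos hm, List.count_eq_one_of_mem h hm]; rfl
  · rw [if_neg hm]; exact_mod_cast List.count_eq_zero.mpr hm

theorem pv_main (nums : List Int) (rules : List (Int × List Int)) :
    order_updates nums rules = order_updates_alt nums rules := by
  by_cases hnil : nums = []
  · subst hnil; rfl
  · -- abbreviations
    set rd := PySem.Dict.ofList rules with hrd
    set present : PySem.Set Int := PySem.Set.ofList nums with hpresent
    set ks := nums.filter (fun k => rd.contains k) with hks
    set K := pvNewKeys rd PySem.Set.empty nums with hK
    have hKofList : PySem.Set.ofList ks = K := by
      have := pv_newKeys_update rd nums PySem.Set.empty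
      simpa [PySem.Set.update_nil_left, PySem.Set.empty] using this
    -- the dictionary A builds
    set newOrd : PySem.Dict Int (PySem.Set Int) :=
      nums.foldl (fun d num =>
        if rd.contains num then
          (rd.getD num []).foldl
            (fun d x => if PySem.Set.contains present x then
                d.modify num [] (fun s => PySem.Set.add s x)
              else d)
            (d.insert num PySem.Set.empty)
        else d) PySem.Dict.empty with hnewOrd
    obtain ⟨hkeys, hgetD⟩ := pv_outerA rd present nums PySem.Dict.empty
    rw [← hnewOrd] at hkeys hgetD
    rw [PySem.Dict.keys_empty, PySem.Set.update_nil_left, ← hks] at hkeys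
    have hnodup : newOrd.keys.Nodup := by rw [hkeys]; exact PySem.Set.nodup_ofList ks
    have hvalues : newOrd.values = (PySem.Set.ofList ks).map (fun k => newOrd.getD k []) := by
      rw [PySem.Dict.values_eq_map_keys newOrd hnodup ([] : PySem.Set Int), hkeys]
    -- B's counts dict
    set counts0 : PySem.Dict Int Int := nums.foldl (fun d n => d.insert n 0) PySem.Dict.empty with hcounts0
    set stB := nums.foldl (fun (st : PySem.Dict Int Int × PySem.Set Int) k =>
        if PySem.Set.contains st.2 k || !rd.contains k then st
        else ((PySem.Set.ofList (rd.getD k [])).foldl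
                (fun c x => if c.contains x then c.modify x 0 (· + 1) else c) st.1,
              PySem.Set.add st.2 k)) (counts0, PySem.Set.empty) with hstB
    obtain ⟨-, hBg⟩ := pv_outerB rd nums counts0 PySem.Set.empty
    rw [← hstB] at hBg
    -- per-element equality of the two pair lists
    have hamount : ∀ num ∈ nums,
        (newOrd.values.foldl
          (fun amount pred => if PySem.Set.contains pred num then amount + 1 else amount) (0 : Int))
        = stB.1.getD num 0 := by
      intro num hmem
      rw [PySem.List.foldl_if_add_one (p := fun pred => PySem.Set.contains pred num)]
      rw [hvalues, List.countP_map]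
      rw [hBg num, pv_counts0_getD, pv_counts0_contains, if_pos (by simpa using hmem), ← hK]
      -- rewrite each count as an indicator
      have hmapeq : (K.map (fun k => ((PySem.Set.ofList (rd.getD k [])).count num : Int)))
          = K.map (fun k => if PySem.Set.contains (PySem.Set.ofList (rd.getD k [])) num then 1 else 0) := by
        refine List.map_congr_left (fun k _ => ?_)
        rw [pv_count_nodup _ _ (PySem.Set.nodup_ofList _)]
        congr 1
        simp [PySem.Set.contains]
      rw [hmapeq, PySem.List.sum_map_ite_one_zero]
      simp only [zero_add]
      rw [← hKofList]
      refine congrArg _ (List.countP_congr ?_)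
      intro k hk
      rw [Function.comp_apply, hgetD k]
      rw [if_pos (by rw [← hks]; exact (PySem.Set.mem_ofList ks k).mp hk)]
      have hpmm : num ∈ present := by rw [hpresent]; exact (PySem.Set.mem_ofList nums num).mpr hmem
      simp only [PySem.Set.contains, List.contains_eq_mem, decide_eq_true_eq,
        PySem.Set.mem_ofList, List.mem_filter]
      exact ⟨fun h => h.1, fun h => ⟨h, hpmm⟩⟩
    -- the two sorted pair lists are equal
    have hpairsA : (nums.foldl (fun acc num =>
        acc ++ [((newOrd.values.foldl
            (fun amount pred => if PySem.Set.contains pred num then amount + 1 else amount)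
            (0 : Int)), num)]) ([] : List (Int × Int)))
        = nums.map (fun n => (stB.1.getD n 0, n)) := by
      rw [PySem.List.foldl_append_singleton_eq_map
            (f := fun num => ((newOrd.values.foldl
              (fun amount pred => if PySem.Set.contains pred num then amount + 1 else amount)
              (0 : Int)), num))]
      rw [List.nil_append]
      exact List.map_congr_left (fun n hn => by rw [hamount n hn])
    -- final extraction
    set pairs := PySem.List.sorted2 (nums.map (fun n => (stB.1.getD n 0, n)))
        (fun p => p.1) (fun p => p.2) false with hpairs
    have hlen : pairs.length = nums.length := by
      rw [hpairs, (PySem.List.sorted2_perm _ _ _ _).length_eq, List.length_map]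
    have hn1 : 0 < nums.length := List.length_pos_iff.mpr hnil
    show order_updates nums rules = order_updates_alt nums rules
    rw [order_updates, order_updates_alt, if_neg hnil]
    simp only [← hrd, ← hpresent, ← hnewOrd, ← hcounts0, ← hstB]
    rw [hpairsA, ← hpairs]
    -- A side
    rw [List.length_reverse, hlen]
    rw [pv_midLoop_get _ 0 (nums.length / 2) (Nat.zero_le _)
        (by rw [List.length_reverse, hlen]; omega)]
    rw [List.getElem_reverse]
    -- B side
    have hidx : ((nums.length : Int) - 1) = ((nums.length - 1 : Nat) : Int) := by omega
    rw [hidx, PySem.Int.floordiv_eq_ediv_of_pos (by norm_num)]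
    have hcast : ((nums.length - 1 : Nat) : Int) / 2 = (((nums.length - 1) / 2 : Nat) : Int) := by omega
    rw [hcast, PySem.List.pyGet?_natCast]
    have hlt : (nums.length - 1) / 2 < pairs.length := by rw [hlen]; omega
    rw [List.getElem?_eq_getElem hlt]
    have heq : pairs.length - 1 - nums.length / 2 = (nums.length - 1) / 2 := by
      rw [hlen]; omega
    simp only [Nat.sub_zero, heq]

-- ===== VERDICT (by name: the statement is the Claim_ definition above) =====
theorem order_updates_spec : Claim_equal_order_updates := by
  intro nums rules _
  unfold Spec_order_updates
  exact pv_main nums rules
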